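-- pv_equiv track=rewrite | github.com/pypi-data/pypi-mirror-389 | packages/gap-mapper/gap_mapper-0.1.0.tar.gz/gap_mapper-0.1.0/gap_mapper/core.py | _build_space_map
-- ===== SOURCE A (Python) =====
-- def _build_space_map(text: str) -> tuple[str, list[int]]:
--     """
--     Internal helper function.
--     Creates a compacted version of the text and a map of cumulative
--     space counts for each non-space character.
--
--     Returns:
--         tuple[str, list[int]]: (compacted_text, space_map)
--     """
--     compacted_text = []
--     space_map = []
--     space_count = 0
--
--     for char in text:
--         if char.isspace():
--             space_count += 1
--         else:
--             compacted_text.append(char)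
--             space_map.append(space_count)
--
--     return "".join(compacted_text), space_map
-- ===== SOURCE B (Python) =====
-- def _build_space_map(text: str) -> tuple[str, list[int]]:
--     # Prefix-sum decomposition: cum[j] = whitespace chars in text[0..j] inclusive,
--     # then select non-space positions; for those, cum[j] = spaces before them.
--     cum = []
--     total = 0
--     for c in text:
--         total += c.isspace()
--         cum.append(total)
--     compacted = "".join(c for c in text if not c.isspace())
--     space_map = [n for n, c in zip(cum, text) if not c.isspace()]
--     return compacted, space_map
-- ===== Notes on version B (the rewrite author's own statement) =====
-- stated objective: alternative
-- what changed: B replaces A's single interleaved loop (carrying compacted chars, map and counter together) by a prefix-sum table over all characters followed by two independent selection passes (join-filter for the text, zip-filter for the map).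
import Mathlib
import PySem

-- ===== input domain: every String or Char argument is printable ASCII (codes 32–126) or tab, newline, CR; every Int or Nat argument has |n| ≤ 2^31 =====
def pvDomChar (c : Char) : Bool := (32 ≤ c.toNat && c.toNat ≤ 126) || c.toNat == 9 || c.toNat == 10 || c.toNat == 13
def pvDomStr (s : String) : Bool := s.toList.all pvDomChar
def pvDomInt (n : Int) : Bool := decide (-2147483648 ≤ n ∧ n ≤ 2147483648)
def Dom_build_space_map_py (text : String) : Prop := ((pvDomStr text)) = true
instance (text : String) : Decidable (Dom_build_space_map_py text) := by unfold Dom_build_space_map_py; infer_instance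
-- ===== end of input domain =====

-- A's interleaved loop vs B's prefix-sum table + two selection passes; objective: alternative decomposition.


-- ===== PORT A =====
-- literal port of A: one fold carrying (compacted chars, space_map, space_count)
def build_space_map_py (text : String) : String × List Int :=
  let r := text.toList.foldl
    (fun (st : List Char × List Int × Int) c =>
      if PySem.Chars.isspace c then (st.1, st.2.1, st.2.2 + 1)
      else (st.1 ++ [c], st.2.1 ++ [st.2.2], st.2.2))
    ([], [], 0)
  (String.mk r.1, r.2.1)

-- ===== PORT B =====
-- literal port of B: prefix-sum table cum, then join-filter and zip-filter passes
def build_space_map_py_alt (text : String) : String × List Int :=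
  let cs := text.toList
  let cum := (cs.foldl
    (fun (st : List Int × Int) c =>
      let t := st.2 + (if PySem.Chars.isspace c then 1 else 0)
      (st.1 ++ [t], t))
    ([], 0)).1
  let compacted := String.mk (cs.filter (fun c => !PySem.Chars.isspace c))
  let space_map := (cum.zip cs).filterMap
    (fun p => if PySem.Chars.isspace p.2 then none else some p.1)
  (compacted, space_map)

-- ===== PRECONDITION & SPEC =====
def Spec_build_space_map_py (text : String) (out : String × List Int) : Prop := out = build_space_map_py_alt text
instance (text : String) (out : String × List Int) : Decidable (Spec_build_space_map_py text out) := by unfold Spec_build_space_map_py; infer_instance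

-- ===== CLAIM (what is proved, stated in full; the proofs are below) =====
def Claim_equal_build_space_map_py : Prop := ∀ (text : String), Dom_build_space_map_py text → Spec_build_space_map_py text (build_space_map_py text)

-- ===== LEMMAS AND PROOFS =====

-- canonical space map starting from count k
def smFrom (k : Int) : List Char → List Int
  | [] => []
  | c :: cs => if PySem.Chars.isspace c then smFrom (k + 1) cs else k :: smFrom k cs

-- canonical inclusive prefix-sum table starting from count k
def cumFrom (k : Int) : List Char → List Int
  | [] => []
  | c :: cs =>
      let t := k + (if PySem.Chars.isspace c then 1 else 0)
      t :: cumFrom t cs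

lemma a_fold_eq (cs : List Char) : ∀ (a : List Char) (b : List Int) (k : Int),
    cs.foldl
      (fun (st : List Char × List Int × Int) c =>
        if PySem.Chars.isspace c then (st.1, st.2.1, st.2.2 + 1)
        else (st.1 ++ [c], st.2.1 ++ [st.2.2], st.2.2))
      (a, b, k)
    = (a ++ cs.filter (fun c => !PySem.Chars.isspace c), b ++ smFrom k cs,
       k + ((cs.filter (fun c => PySem.Chars.isspace c)).length : Int)) := by
  induction cs with
  | nil => simp [smFrom]
  | cons c cs ih =>
      intro a b k
      by_cases h : PySem.Chars.isspace c = true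
      · simp [List.foldl_cons, h, ih, smFrom]
        omega
      · simp at h
        simp [List.foldl_cons, h, ih, smFrom]

lemma b_fold_eq (cs : List Char) : ∀ (a : List Int) (k : Int),
    cs.foldl
      (fun (st : List Int × Int) c =>
        let t := st.2 + (if PySem.Chars.isspace c then 1 else 0)
        (st.1 ++ [t], t))
      (a, k)
    = (a ++ cumFrom k cs, k + ((cs.filter (fun c => PySem.Chars.isspace c)).length : Int)) := by
  induction cs with
  | nil => simp [cumFrom]
  | cons c cs ih =>
      intro a k
      by_cases h : PySem.Chars.isspace c = true
      · simp [List.foldl_cons, h, ih, cumFrom]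
        omega
      · simp at h
        simp [List.foldl_cons, h, ih, cumFrom]

lemma zip_cum_eq_smFrom (cs : List Char) : ∀ (k : Int),
    ((cumFrom k cs).zip cs).filterMap
      (fun p => if PySem.Chars.isspace p.2 then none else some p.1)
    = smFrom k cs := by
  induction cs with
  | nil => intro k; simp [cumFrom, smFrom]
  | cons c cs ih =>
      intro k
      by_cases h : PySem.Chars.isspace c = true
      · simp [cumFrom, smFrom, h, ih]
      · simp at h
        simp [cumFrom, smFrom, h, ih]

-- ===== VERDICT (by name: the statement is the Claim_ definition above) =====
theorem build_space_map_py_spec : Claim_equal_build_space_map_py := by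
  intro text _
  unfold Spec_build_space_map_py build_space_map_py build_space_map_py_alt
  simp only [a_fold_eq, b_fold_eq, zip_cum_eq_smFrom, List.nil_append]
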